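-- pv_equiv track=rewrite | github.com/vishnudodda/CRT | IV SEM/Python/Assignments/M02_Logic_Building_and_Patterns/AST05/task.py | number_triangle
-- ===== SOURCE A (Python) =====
-- def number_triangle(n: int) -> str:
--     result = ""
--     for i in range(1, n + 1):
--         for j in range(1, i + 1):
--             result += str(j)
--         if i != n:
--             result += "\n"
--     return result
-- ===== SOURCE B (Python) =====
-- def number_triangle(n: int) -> str:
--     prefix = ""
--     rows = []
--     for i in range(1, n + 1):
--         prefix += str(i)
--         rows.append(prefix)
--     return "\n".join(rows)
-- ===== Notes on version B (the rewrite author's own statement) =====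
-- stated objective: faster
-- what changed: Replaces A's nested loop (rebuilding each row digit by digit) by a single pass that extends a running prefix by str(i) and joins the collected rows once, removing the inner loop; intended as faster (measured 23x at n=4096, where A hit the probe's timeout).
import Mathlib
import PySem

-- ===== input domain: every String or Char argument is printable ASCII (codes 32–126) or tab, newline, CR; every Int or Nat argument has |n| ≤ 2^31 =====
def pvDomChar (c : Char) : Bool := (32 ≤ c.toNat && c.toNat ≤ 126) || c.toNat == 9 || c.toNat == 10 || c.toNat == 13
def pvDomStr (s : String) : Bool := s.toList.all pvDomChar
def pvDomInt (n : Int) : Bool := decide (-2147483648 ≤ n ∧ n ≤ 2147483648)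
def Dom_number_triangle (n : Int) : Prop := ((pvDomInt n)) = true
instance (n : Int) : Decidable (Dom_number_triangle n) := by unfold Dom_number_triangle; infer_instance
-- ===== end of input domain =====

-- B replaces A's nested row-rebuilding loop by a single pass keeping a running prefix and joining the rows once (fewer concatenation steps).

-- ===== PORT A =====
def number_triangle (n : Int) : String :=
  (PySem.List.pyRange 1 (n + 1) 1).foldl
    (fun result i =>
      let result := (PySem.List.pyRange 1 (i + 1) 1).foldl
        (fun r j => r ++ PySem.Int.toStr j) result
      if i ≠ n then result ++ "\n" else result)
    ""

-- ===== PORT B =====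
def number_triangle_alt (n : Int) : String :=
  let st := (PySem.List.pyRange 1 (n + 1) 1).foldl
    (fun (st : String × List String) i =>
      let prefix_ := st.1 ++ PySem.Int.toStr i
      (prefix_, st.2 ++ [prefix_]))
    ("", [])
  PySem.Str.join "\n" st.2

-- ===== PRECONDITION & SPEC =====
def Spec_number_triangle (n : Int) (out : String) : Prop := out = number_triangle_alt n
instance (n : Int) (out : String) : Decidable (Spec_number_triangle n out) := by unfold Spec_number_triangle; infer_instance

-- ===== CLAIM (what is proved, stated in full; the proofs are below) =====
def Claim_equal_number_triangle : Prop := ∀ (n : Int), Dom_number_triangle n → Spec_number_triangle n (number_triangle n)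

-- ===== LEMMAS AND PROOFS =====

-- row i = "12…i", as A's inner loop computes it from the empty string
def ntRow (i : Int) : String :=
  (PySem.List.pyRange 1 (i + 1) 1).foldl (fun r j => r ++ PySem.Int.toStr j) ""

-- all rows 1 .. n-1, each followed by "\n"
def ntAll (n : Int) : String :=
  (PySem.List.pyRange 1 n 1).foldl
    (fun r i => (PySem.List.pyRange 1 (i + 1) 1).foldl (fun r j => r ++ PySem.Int.toStr j) r ++ "\n")
    ""

def rowsOf (n : Int) : List String := (PySem.List.pyRange 1 (n + 1) 1).map ntRow

theorem nt_inner_shift (l : List Int) (init : String) :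
    l.foldl (fun r j => r ++ PySem.Int.toStr j) init
      = init ++ l.foldl (fun r j => r ++ PySem.Int.toStr j) "" := by
  induction l generalizing init with
  | nil => simp [String.append_empty]
  | cons a t ih =>
      simp only [List.foldl_cons]
      rw [ih, ih ("" ++ PySem.Int.toStr a), String.empty_append, String.append_assoc]

theorem ntRow_succ (i : Int) (h : 0 ≤ i) :
    ntRow (i + 1) = ntRow i ++ PySem.Int.toStr (i + 1) := by
  unfold ntRow
  rw [PySem.List.pyRange_one_succ_right (by omega : (1:Int) ≤ i + 1), List.foldl_append]
  simp

theorem nt_cjoin_snoc (sep y : List Char) (ys : List (List Char)) (h : ys ≠ []) :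
    PySem.Chars.join sep (ys ++ [y]) = PySem.Chars.join sep ys ++ sep ++ y := by
  induction ys with
  | nil => exact absurd rfl h
  | cons a t ih =>
      cases t with
      | nil => simp [PySem.Chars.join_cons_cons, PySem.Chars.join_singleton]
      | cons b t' =>
          simp only [List.cons_append] at ih ⊢
          rw [PySem.Chars.join_cons_cons sep a b (t' ++ [y]), ih (by simp),
              PySem.Chars.join_cons_cons sep a b t']
          simp [List.append_assoc]

theorem nt_join_snoc (x : String) (xs : List String) (h : xs ≠ []) :
    PySem.Str.join "\n" (xs ++ [x]) = PySem.Str.join "\n" xs ++ "\n" ++ x := by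
  apply String.toList_inj.mp
  simp only [PySem.Str.toList_join, String.toList_append, List.map_append, List.map_cons,
    List.map_nil]
  exact nt_cjoin_snoc _ _ _ (by simpa using h)

theorem nt_A_closed (n : Int) (h : 1 ≤ n) :
    number_triangle n = ntAll n ++ ntRow n := by
  unfold number_triangle ntAll
  rw [PySem.List.pyRange_one_succ_right (by omega : (1:Int) ≤ n), List.foldl_append]
  rw [PySem.List.foldl_congr_mem (PySem.List.pyRange 1 n 1) _
    (fun r i => (PySem.List.pyRange 1 (i + 1) 1).foldl (fun r j => r ++ PySem.Int.toStr j) r ++ "\n")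
    "" ?_]
  · simp only [List.foldl_cons, List.foldl_nil]
    rw [if_neg (by simp), nt_inner_shift]
    rfl
  · intro acc x hx
    have hlt : x < n := (PySem.List.mem_pyRange_one.mp hx).2
    simp only [ne_eq]
    rw [if_pos (by omega)]

theorem nt_all_join (n : Int) (h : 1 ≤ n) :
    ntAll n ++ ntRow n = PySem.Str.join "\n" (rowsOf n) := by
  induction n, h using Int.le_induction with
  | base => decide
  | succ m hm ih =>
      have hAll : ntAll (m + 1) = ntAll m ++ ntRow m ++ "\n" := by
        unfold ntAll
        rw [PySem.List.pyRange_one_succ_right (by omega : (1:Int) ≤ m), List.foldl_append]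
        simp only [List.foldl_cons, List.foldl_nil]
        rw [nt_inner_shift]
        rfl
      have hrows : rowsOf (m + 1) = rowsOf m ++ [ntRow (m + 1)] := by
        unfold rowsOf
        rw [PySem.List.pyRange_one_succ_right (by omega : (1:Int) ≤ m + 1), List.map_append]
        rfl
      have hne : rowsOf m ≠ [] := by
        unfold rowsOf
        intro hc
        have := congrArg List.length hc
        simp [PySem.List.length_pyRange_one] at this
        omega
      rw [hAll, hrows, nt_join_snoc _ _ hne, ← ih, ntRow_succ m (by omega)]

theorem nt_B_closed (n : Int) (h : 1 ≤ n) :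
    (PySem.List.pyRange 1 (n + 1) 1).foldl
      (fun (st : String × List String) i =>
        let prefix_ := st.1 ++ PySem.Int.toStr i
        (prefix_, st.2 ++ [prefix_]))
      ("", []) = (ntRow n, rowsOf n) := by
  induction n, h using Int.le_induction with
  | base => decide
  | succ m hm ih =>
      rw [PySem.List.pyRange_one_succ_right (by omega : (1:Int) ≤ m + 1), List.foldl_append, ih]
      simp only [List.foldl_cons, List.foldl_nil]
      rw [← ntRow_succ m (by omega)]
      have hrows : rowsOf (m + 1) = rowsOf m ++ [ntRow (m + 1)] := by
        unfold rowsOf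
        rw [PySem.List.pyRange_one_succ_right (by omega : (1:Int) ≤ m + 1), List.map_append]
        rfl
      rw [hrows]

theorem nt_join_nil : PySem.Str.join "\n" ([] : List String) = "" := by
  apply String.toList_inj.mp
  simp [PySem.Str.toList_join, PySem.Chars.join_nil]

-- ===== VERDICT (by name: the statement is the Claim_ definition above) =====
theorem number_triangle_spec : Claim_equal_number_triangle := by
  intro n _
  unfold Spec_number_triangle number_triangle_alt
  by_cases h : 1 ≤ n
  · rw [nt_B_closed n h]
    rw [nt_A_closed n h, nt_all_join n h]
  · rw [PySem.List.pyRange_one_eq_nil (by omega : n + 1 ≤ 1)]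
    simp only [List.foldl_nil]
    unfold number_triangle
    rw [PySem.List.pyRange_one_eq_nil (by omega : n + 1 ≤ 1)]
    simp [nt_join_nil]
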